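-- pv_equiv track=rewrite | github.com/pushking812/accounting | accounting.py | merge_dicts_by_key
-- ===== SOURCE A (Python) =====
-- def merge_dicts_by_key(dict1, dict2):
--     merged_dict = {}
--     not_found_dict = {}
--     for key, value in dict2.items():
--         if key in dict1:
--             merged_dict[key] = {**dict1[key], **value}
--         else:
--             not_found_dict[key] = value
--     return merged_dict, not_found_dict
-- ===== SOURCE B (Python) =====
-- def merge_dicts_by_key(dict1, dict2):
--     # Divide-and-conquer: split dict2's items in half, solve each half
--     # independently as plain pair lists, concatenate, and build dicts once
--     # at the end. Concatenation preserves dict2's item order, so the result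
--     # is identical to a left-to-right partition.
--     def go(items):
--         if len(items) == 0:
--             return [], []
--         if len(items) == 1:
--             k, v = items[0]
--             if k in dict1:
--                 return [(k, {**dict1[k], **v})], []
--             return [], [(k, v)]
--         mid = len(items) // 2
--         lm, lnf = go(items[:mid])
--         rm, rnf = go(items[mid:])
--         return lm + rm, lnf + rnf
--
--     m, nf = go(list(dict2.items()))
--     return dict(m), dict(nf)
-- ===== Notes on version B (the rewrite author's own statement) =====
-- stated objective: alternative
-- what changed: A's single left-to-right loop with two accumulator dicts is replaced by a divide-and-conquer recursion that splits dict2's items in half, partitions and merges each half independently into plain pair lists, concatenates the halves, and converts to dicts once at the end.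
import Mathlib
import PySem

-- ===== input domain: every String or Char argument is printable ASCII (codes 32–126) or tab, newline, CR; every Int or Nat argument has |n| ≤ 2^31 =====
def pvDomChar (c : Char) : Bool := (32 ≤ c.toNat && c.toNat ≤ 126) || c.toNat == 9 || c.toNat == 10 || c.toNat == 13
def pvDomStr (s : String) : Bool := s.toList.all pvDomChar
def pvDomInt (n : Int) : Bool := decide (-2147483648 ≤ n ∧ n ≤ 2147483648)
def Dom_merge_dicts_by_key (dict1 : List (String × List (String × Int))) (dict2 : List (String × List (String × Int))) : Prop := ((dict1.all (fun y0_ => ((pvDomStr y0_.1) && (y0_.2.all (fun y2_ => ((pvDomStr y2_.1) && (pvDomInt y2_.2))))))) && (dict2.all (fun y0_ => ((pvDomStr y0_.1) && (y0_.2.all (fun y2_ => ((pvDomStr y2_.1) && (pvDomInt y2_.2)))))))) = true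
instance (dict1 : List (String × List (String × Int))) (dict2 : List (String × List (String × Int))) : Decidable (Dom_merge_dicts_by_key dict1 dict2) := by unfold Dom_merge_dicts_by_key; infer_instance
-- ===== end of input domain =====

-- B replaces A's single accumulator loop by a divide-and-conquer recursion over dict2's
-- items (split in half, partition/merge each half into plain pair lists, concatenate,
-- build the two dicts once at the end). Objective: alternative; same results, no speed claim.

-- ===== PORT A =====
-- {**old, **new} : dict union, later entries overwrite (PySem.Dict.update is exactly Python d.update)
def pvInnerMerge (old new : List (String × Int)) : List (String × Int) :=
  ((PySem.Dict.mk old).update new).items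

def merge_dicts_by_key (dict1 : List (String × List (String × Int))) (dict2 : List (String × List (String × Int))) : (List (String × List (String × Int))) × (List (String × List (String × Int))) :=
  let d1 : PySem.Dict String (List (String × Int)) := PySem.Dict.mk dict1
  let res := dict2.foldl
    (fun acc kv =>
      if d1.contains kv.1 then
        -- dict1[key] is present here (guarded by the contains test), so getD's default is never used
        (acc.1.insert kv.1 (pvInnerMerge (d1.getD kv.1 []) kv.2), acc.2)
      else
        (acc.1, acc.2.insert kv.1 kv.2))
    (PySem.Dict.empty, PySem.Dict.empty)
  (res.1.items, res.2.items)

-- ===== PORT B =====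
-- go: divide and conquer on the item list. items[:mid] / items[mid:] with
-- 0 <= mid <= len are exactly List.take / List.drop. The fuel argument (= list length
-- at the top call) only makes the halving recursion structurally total; it is never exhausted.
def pvGoB (d1 : PySem.Dict String (List (String × Int))) : Nat → List (String × List (String × Int)) → (List (String × List (String × Int))) × (List (String × List (String × Int)))
  | _, [] => ([], [])
  | _, [kv] =>
      if d1.contains kv.1 then
        -- dict1[k] is present here (guarded), so getD's default is never used
        ([(kv.1, pvInnerMerge (d1.getD kv.1 []) kv.2)], [])
      else
        ([], [kv])
  | 0, _ :: _ :: _ => ([], [])   -- unreachable: fuel ≥ list length at every call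
  | fuel + 1, kv1 :: kv2 :: rest =>
      let l := kv1 :: kv2 :: rest
      let mid := l.length / 2
      let left := pvGoB d1 fuel (l.take mid)
      let right := pvGoB d1 fuel (l.drop mid)
      (left.1 ++ right.1, left.2 ++ right.2)

def merge_dicts_by_key_alt (dict1 : List (String × List (String × Int))) (dict2 : List (String × List (String × Int))) : (List (String × List (String × Int))) × (List (String × List (String × Int))) :=
  let d1 : PySem.Dict String (List (String × Int)) := PySem.Dict.mk dict1
  let res := pvGoB d1 dict2.length dict2
  ((PySem.Dict.mk res.1).items, (PySem.Dict.mk res.2).items)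

-- ===== PRECONDITION & SPEC =====
-- Pre_ only requires the association lists to be genuine dicts (no duplicate outer keys):
-- a Python dict can never present duplicate keys, so this excludes no input A actually receives.
def Pre_merge_dicts_by_key (dict1 : List (String × List (String × Int))) (dict2 : List (String × List (String × Int))) : Prop :=
  (dict1.map Prod.fst).Nodup ∧ (dict2.map Prod.fst).Nodup
instance (dict1 : List (String × List (String × Int))) (dict2 : List (String × List (String × Int))) : Decidable (Pre_merge_dicts_by_key dict1 dict2) := by unfold Pre_merge_dicts_by_key; infer_instance

def pvWitness_merge_dicts_by_key : (List (String × List (String × Int))) × (List (String × List (String × Int))) :=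
  ([("a", [("x", 1)]), ("b", [("y", 2)])], [("a", [("x", 3), ("z", 4)]), ("c", [("w", 5)])])

def Spec_merge_dicts_by_key (dict1 : List (String × List (String × Int))) (dict2 : List (String × List (String × Int))) (out : (List (String × List (String × Int))) × (List (String × List (String × Int)))) : Prop := out = merge_dicts_by_key_alt dict1 dict2
instance (dict1 : List (String × List (String × Int))) (dict2 : List (String × List (String × Int))) (out : (List (String × List (String × Int))) × (List (String × List (String × Int)))) : Decidable (Spec_merge_dicts_by_key dict1 dict2 out) := by unfold Spec_merge_dicts_by_key; infer_instance

-- ===== CLAIM (what is proved, stated in full; the proofs are below) =====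
def Claim_equal_merge_dicts_by_key : Prop := ∀ (dict1 : List (String × List (String × Int))) (dict2 : List (String × List (String × Int))), Dom_merge_dicts_by_key dict1 dict2 → Pre_merge_dicts_by_key dict1 dict2 → Spec_merge_dicts_by_key dict1 dict2 (merge_dicts_by_key dict1 dict2)

-- ===== LEMMAS AND PROOFS =====

-- A's loop invariant: folding over a block of pairwise-fresh keys appends to both
-- accumulators exactly the filterMap/filter of that block.
theorem pv_fold_invariant
    (d1 : PySem.Dict String (List (String × Int)))
    (l : List (String × List (String × Int)))
    (hl : (l.map Prod.fst).Nodup)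
    (m nf : PySem.Dict String (List (String × Int)))
    (hm : ∀ kv ∈ l, m.contains kv.1 = false)
    (hnf : ∀ kv ∈ l, nf.contains kv.1 = false) :
    (l.foldl
      (fun acc kv =>
        if d1.contains kv.1 then
          (acc.1.insert kv.1 (pvInnerMerge (d1.getD kv.1 []) kv.2), acc.2)
        else
          (acc.1, acc.2.insert kv.1 kv.2))
      (m, nf)) =
    (PySem.Dict.mk (m.items ++ l.filterMap (fun kv => (d1.get? kv.1).map (fun v1 => (kv.1, pvInnerMerge v1 kv.2)))),
     PySem.Dict.mk (nf.items ++ l.filter (fun kv => !(d1.contains kv.1)))) := by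
  induction l generalizing m nf with
  | nil => simp
  | cons kv tl ih =>
    simp only [List.map_cons, List.nodup_cons] at hl
    obtain ⟨hhead, htl⟩ := hl
    have hmh := hm kv (List.mem_cons_self ..)
    have hnfh := hnf kv (List.mem_cons_self ..)
    have hfresh : ∀ (v : List (String × Int)) (d : PySem.Dict String (List (String × Int))),
        (∀ kv' ∈ kv :: tl, d.contains kv'.1 = false) → ∀ kv' ∈ tl, (d.insert kv.1 v).contains kv'.1 = false := by
      intro v d hd kv' hkv'
      rw [PySem.Dict.contains_insert]
      have hne : kv'.1 ≠ kv.1 := by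
        intro h
        exact hhead (h ▸ List.mem_map_of_mem hkv')
      simp [hne, hd kv' (List.mem_cons_of_mem _ hkv')]
    by_cases hc : d1.contains kv.1 = true
    · have hget : ∃ v1, d1.get? kv.1 = some v1 := by
        have := PySem.Dict.contains_eq_isSome_get? (d := d1) (k := kv.1)
        rw [hc] at this
        exact Option.isSome_iff_exists.mp this.symm
      obtain ⟨v1, hv1⟩ := hget
      have hgetD : d1.getD kv.1 [] = v1 := by simp [PySem.Dict.getD_eq_get?_getD, hv1]
      rw [List.foldl_cons, if_pos hc]
      rw [ih htl _ _ (fun kv' h => hfresh _ m hm kv' h) (fun kv' h => hnf kv' (List.mem_cons_of_mem _ h))]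
      simp [PySem.Dict.items_insert_of_not_contains, hmh, hv1, hgetD, hc]
    · have hc' : d1.contains kv.1 = false := by simpa using hc
      have hget : d1.get? kv.1 = none := by
        have := PySem.Dict.contains_eq_isSome_get? (d := d1) (k := kv.1)
        rw [hc'] at this
        simpa [Option.isSome_eq_false_iff, Option.isNone_iff_eq_none] using this.symm
      rw [List.foldl_cons, if_neg hc]
      rw [ih htl _ _ (fun kv' h => hm kv' (List.mem_cons_of_mem _ h)) (fun kv' h => hfresh _ nf hnf kv' h)]
      simp [PySem.Dict.items_insert_of_not_contains, hnfh, hget, hc']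

-- B's divide-and-conquer equals the left-to-right partition of the whole list
-- (for any sufficient fuel).
theorem pv_goB_eq
    (d1 : PySem.Dict String (List (String × Int)))
    (fuel : Nat) (l : List (String × List (String × Int)))
    (hf : l.length ≤ fuel) :
    pvGoB d1 fuel l =
    (l.filterMap (fun kv => (d1.get? kv.1).map (fun v1 => (kv.1, pvInnerMerge v1 kv.2))),
     l.filter (fun kv => !(d1.contains kv.1))) := by
  induction fuel generalizing l with
  | zero =>
    match l, hf with
    | [], _ => simp [pvGoB]
  | succ fuel ih =>
    match l with
    | [] => simp [pvGoB]
    | [kv] =>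
      by_cases hc : d1.contains kv.1 = true
      · have hget : ∃ v1, d1.get? kv.1 = some v1 := by
          have := PySem.Dict.contains_eq_isSome_get? (d := d1) (k := kv.1)
          rw [hc] at this
          exact Option.isSome_iff_exists.mp this.symm
        obtain ⟨v1, hv1⟩ := hget
        have hgetD : d1.getD kv.1 [] = v1 := by simp [PySem.Dict.getD_eq_get?_getD, hv1]
        simp [pvGoB, hc, hv1, hgetD]
      · have hc' : d1.contains kv.1 = false := by simpa using hc
        have hget : d1.get? kv.1 = none := by
          have := PySem.Dict.contains_eq_isSome_get? (d := d1) (k := kv.1)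
          rw [hc'] at this
          simpa [Option.isSome_eq_false_iff, Option.isNone_iff_eq_none] using this.symm
        simp [pvGoB, hc', hget]
    | kv1 :: kv2 :: rest =>
      have hlen : (kv1 :: kv2 :: rest).length ≤ fuel + 1 := hf
      simp only [List.length_cons] at hlen
      rw [pvGoB]
      rw [ih _ (by simp only [List.length_take, List.length_cons]; omega)]
      rw [ih _ (by simp only [List.length_drop, List.length_cons]; omega)]
      rw [← List.filterMap_append, ← List.filter_append, List.take_append_drop]

-- ===== VERDICT (by name: the statement is the Claim_ definition above) =====
theorem merge_dicts_by_key_spec : Claim_equal_merge_dicts_by_key := by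
  intro dict1 dict2 _ hpre
  unfold Spec_merge_dicts_by_key merge_dicts_by_key merge_dicts_by_key_alt
  have h := pv_fold_invariant (PySem.Dict.mk dict1) dict2 hpre.2
    PySem.Dict.empty PySem.Dict.empty
    (fun kv _ => PySem.Dict.contains_empty kv.1)
    (fun kv _ => PySem.Dict.contains_empty kv.1)
  simp only [h, pv_goB_eq _ _ _ (le_refl _)]
  simp [PySem.Dict.empty]
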